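-- pv_equiv track=rewrite | github.com/Timofei415/ChessProject | chessNetwork.py | threefold
-- ===== SOURCE A (Python) =====
-- def threefold(positionrecord):
-- 	i = 0
-- 	k = 0
-- 	result = False
-- 	while i < len(positionrecord):
-- 		k = 0
-- 		j = i
-- 		while j < len(positionrecord):
-- 			if (positionrecord[i] == positionrecord[j]):
-- 				k = k + 1
-- 			if (k == 3):
-- 				result = True
-- 				break
-- 			j = j + 1
-- 		if (result == True):
-- 			break
-- 		i = i + 1
-- 	return(result)
-- ===== SOURCE B (Python) =====
-- def threefold(positionrecord):
--     counts = {}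
--     for p in positionrecord:
--         c = counts.get(p, 0) + 1
--         if c >= 3:
--             return True
--         counts[p] = c
--     return False
-- ===== Notes on version B (the rewrite author's own statement) =====
-- stated objective: faster
-- what changed: Replaces the nested index-scanning while loops (for each i, recount matches in the suffix) with a single pass that maintains a hash-map occurrence counter and returns True on the third occurrence of any element.
import Mathlib
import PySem

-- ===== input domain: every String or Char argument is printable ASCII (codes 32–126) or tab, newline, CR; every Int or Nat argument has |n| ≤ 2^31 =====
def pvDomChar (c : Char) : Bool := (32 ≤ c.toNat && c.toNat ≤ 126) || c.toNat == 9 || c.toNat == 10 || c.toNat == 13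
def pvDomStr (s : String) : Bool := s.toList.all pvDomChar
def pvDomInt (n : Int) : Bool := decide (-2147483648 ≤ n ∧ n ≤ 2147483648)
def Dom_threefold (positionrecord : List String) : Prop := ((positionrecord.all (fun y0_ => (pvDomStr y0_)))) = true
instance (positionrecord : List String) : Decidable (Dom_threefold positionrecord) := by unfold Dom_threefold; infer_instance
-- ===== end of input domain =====

-- B replaces A's nested suffix-recounting while loops by one pass with a dict occurrence counter (early exit on the third occurrence); return values proved identical.

-- ===== PORT A =====
-- inner while loop: scans j from its start value, counting matches of l[i]; breaks with True when k hits 3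
def threefoldInner (l : List String) (i j k : Nat) : Bool :=
  if _h : j < l.length then
    let k' := if l.getD i "" == l.getD j "" then k + 1 else k
    if k' = 3 then true else threefoldInner l i (j + 1) k'
  else false
termination_by l.length - j

-- outer while loop over i; breaks when the inner loop set result = True
def threefoldOuter (l : List String) (i : Nat) : Bool :=
  if _h : i < l.length then
    if threefoldInner l i i 0 then true else threefoldOuter l (i + 1)
  else false
termination_by l.length - i

def threefold (positionrecord : List String) : Bool :=
  threefoldOuter positionrecord 0

-- ===== PORT B =====
-- the for loop of Source B: dict counter with early return on the third occurrence
def threefoldAltLoop (counts : PySem.Dict String Int) : List String → Bool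
  | [] => false
  | p :: rest =>
    let c := counts.getD p 0 + 1
    if 3 ≤ c then true else threefoldAltLoop (counts.insert p c) rest

def threefold_alt (positionrecord : List String) : Bool :=
  threefoldAltLoop PySem.Dict.empty positionrecord

-- ===== PRECONDITION & SPEC =====
def Spec_threefold (positionrecord : List String) (out : Bool) : Prop := out = threefold_alt positionrecord
instance (positionrecord : List String) (out : Bool) : Decidable (Spec_threefold positionrecord out) := by unfold Spec_threefold; infer_instance

-- ===== CLAIM (what is proved, stated in full; the proofs are below) =====
def Claim_equal_threefold : Prop := ∀ (positionrecord : List String), Dom_threefold positionrecord → Spec_threefold positionrecord (threefold positionrecord)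

-- ===== LEMMAS AND PROOFS =====

-- common reference predicate: some element occurs at least three times
def hasTriple (l : List String) : Bool := decide (∃ x ∈ l, 3 ≤ l.count x)

theorem hasTriple_cons (a : String) (t : List String) :
    hasTriple (a :: t) = (decide (3 ≤ (a :: t).count a) || hasTriple t) := by
  simp only [hasTriple, ← Bool.decide_or, decide_eq_decide]
  constructor
  · rintro ⟨x, hx, hc⟩
    rcases List.mem_cons.mp hx with rfl | hxt
    · exact Or.inl hc
    · by_cases hxa : x = a
      · subst hxa; exact Or.inl hc
      · refine Or.inr ⟨x, hxt, ?_⟩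
        rwa [List.count_cons_of_ne (Ne.symm hxa)] at hc
  · rintro (hc | ⟨x, hxt, hc⟩)
    · exact ⟨a, List.mem_cons_self, hc⟩
    · exact ⟨x, List.mem_cons_of_mem _ hxt, le_trans hc ((List.sublist_cons_self a t).count_le x)⟩

-- A's inner loop counts occurrences of l[i] in the suffix starting at j
theorem threefoldInner_spec (l : List String) (i : Nat) :
    ∀ n j k, l.length - j = n → k ≤ 2 →
      threefoldInner l i j k = decide (3 ≤ k + (l.drop j).count (l.getD i "")) := by
  intro n
  induction n with
  | zero =>
    intro j k hn hk
    have hj : ¬ j < l.length := by omega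
    rw [threefoldInner]
    simp [hj, List.drop_eq_nil_of_le (by omega : l.length ≤ j)]
    omega
  | succ m ih =>
    intro j k hn hk
    have hj : j < l.length := by omega
    have hdrop : l.drop j = l[j] :: l.drop (j + 1) := List.drop_eq_getElem_cons hj
    have hgd : l.getD j "" = l[j] := List.getD_eq_getElem l "" hj
    rw [threefoldInner]
    simp only [hj, dif_pos]
    by_cases heq : l.getD i "" = l.getD j ""
    · have hbeq : (l.getD i "" == l.getD j "") = true := by simpa using heq
      rw [hbeq]
      simp only [if_true]
      have hcount : (l.drop j).count (l.getD i "") = (l.drop (j+1)).count (l.getD i "") + 1 := by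
        rw [hdrop, ← hgd, ← heq, List.count_cons]
        simp
      by_cases h3 : k + 1 = 3
      · rw [if_pos h3, hcount]; symm; simp; omega
      · rw [if_neg h3, ih (j+1) (k+1) (by omega) (by omega), hcount]
        simp only [decide_eq_decide]; omega
    · have hbeq : (l.getD i "" == l.getD j "") = false := by simpa using heq
      rw [hbeq, if_neg Bool.false_ne_true]
      have h3 : ¬ (k = 3) := by omega
      rw [if_neg h3]
      have hcount : (l.drop j).count (l.getD i "") = (l.drop (j+1)).count (l.getD i "") := by
        rw [hdrop, ← hgd, List.count_cons, if_neg (by simpa using Ne.symm heq)]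
        omega
      rw [ih (j+1) k (by omega) hk, hcount]

-- A's outer loop decides the triple-occurrence predicate on the suffix from i
theorem threefoldOuter_spec (l : List String) :
    ∀ n i, l.length - i = n → threefoldOuter l i = hasTriple (l.drop i) := by
  intro n
  induction n with
  | zero =>
    intro i hn
    have hi : ¬ i < l.length := by omega
    rw [threefoldOuter]
    simp [hi, List.drop_eq_nil_of_le (by omega : l.length ≤ i), hasTriple]
  | succ m ih =>
    intro i hn
    have hi : i < l.length := by omega
    have hdrop : l.drop i = l[i] :: l.drop (i + 1) := List.drop_eq_getElem_cons hi
    have hgd : l.getD i "" = l[i] := List.getD_eq_getElem l "" hi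
    rw [threefoldOuter]
    simp only [hi, dif_pos]
    rw [threefoldInner_spec l i (l.length - i) i 0 rfl (by omega)]
    rw [ih (i+1) (by omega)]
    conv_rhs => rw [hdrop]
    rw [hasTriple_cons l[i] (l.drop (i+1)), ← hdrop, ← hgd]
    simp

theorem threefold_eq_hasTriple (l : List String) : threefold l = hasTriple l := by
  rw [threefold, threefoldOuter_spec l l.length 0 rfl, List.drop_zero]

-- B's loop invariant: with all stored counts in [0,2], it decides whether some
-- remaining element's stored count plus remaining occurrences reaches 3
theorem threefoldAltLoop_spec (rest : List String) :
    ∀ (d : PySem.Dict String Int),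
      (∀ x, 0 ≤ d.getD x 0 ∧ d.getD x 0 ≤ 2) →
      threefoldAltLoop d rest = decide (∃ x ∈ rest, 3 ≤ d.getD x 0 + (rest.count x : Int)) := by
  induction rest with
  | nil => intro d _; simp [threefoldAltLoop]
  | cons p t ih =>
    intro d hd
    rw [threefoldAltLoop]
    by_cases h3 : 3 ≤ d.getD p 0 + 1
    · simp only [h3, if_true]
      symm; simp only [decide_eq_true_eq]
      have hp2 : d.getD p 0 = 2 := by have := (hd p).2; omega
      have hcp : ((p :: t).count p : Int) ≥ 1 := by
        have : 1 ≤ (p :: t).count p := by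
          rw [List.count_cons]; simp
        exact_mod_cast this
      exact ⟨p, List.mem_cons_self, by omega⟩
    · simp only [h3, if_false]
      have hd' : ∀ x, 0 ≤ (d.insert p (d.getD p 0 + 1)).getD x 0 ∧
          (d.insert p (d.getD p 0 + 1)).getD x 0 ≤ 2 := by
        intro x
        by_cases hx : x = p
        · subst hx
          rw [PySem.Dict.getD_insert_self]
          have := (hd x).1; omega
        · rw [PySem.Dict.getD_insert_of_ne _ _ _ hx]
          exact hd x
      rw [ih _ hd']
      simp only [decide_eq_decide]
      constructor
      · rintro ⟨x, hxt, hc⟩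
        refine ⟨x, List.mem_cons_of_mem _ hxt, ?_⟩
        by_cases hx : x = p
        · subst hx
          rw [PySem.Dict.getD_insert_self] at hc
          have : (x :: t).count x = t.count x + 1 := by rw [List.count_cons]; simp
          rw [this]; push_cast at hc ⊢; omega
        · rw [PySem.Dict.getD_insert_of_ne _ _ _ hx] at hc
          have : (p :: t).count x = t.count x := List.count_cons_of_ne (Ne.symm hx)
          rw [this]; exact hc
      · rintro ⟨x, hx, hc⟩
        rcases List.mem_cons.mp hx with rfl | hxt
        · -- x = p: its count in p :: t includes this head
          have hct : (x :: t).count x = t.count x + 1 := by rw [List.count_cons]; simp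
          rw [hct] at hc
          have htc : 1 ≤ t.count x := by
            by_contra hle
            have h0 : t.count x = 0 := by omega
            rw [h0] at hc; push_cast at hc; omega
          refine ⟨x, List.count_pos_iff.mp (by omega), ?_⟩
          rw [PySem.Dict.getD_insert_self]
          push_cast at hc ⊢
          omega
        · refine ⟨x, hxt, ?_⟩
          by_cases hxp : x = p
          · subst hxp
            have hct : (x :: t).count x = t.count x + 1 := by rw [List.count_cons]; simp
            rw [hct] at hc
            rw [PySem.Dict.getD_insert_self]
            push_cast at hc ⊢
            omega
          · rw [PySem.Dict.getD_insert_of_ne _ _ _ hxp]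
            have : (p :: t).count x = t.count x := List.count_cons_of_ne (Ne.symm hxp)
            rw [this] at hc; exact hc

theorem threefold_alt_eq_hasTriple (l : List String) : threefold_alt l = hasTriple l := by
  rw [threefold_alt, threefoldAltLoop_spec l PySem.Dict.empty
    (by intro x; rw [PySem.Dict.getD_empty]; omega)]
  simp only [hasTriple, PySem.Dict.getD_empty, decide_eq_decide]
  constructor
  · rintro ⟨x, hx, hc⟩; exact ⟨x, hx, by exact_mod_cast (by omega : (3:Int) ≤ (l.count x : Int))⟩
  · rintro ⟨x, hx, hc⟩; refine ⟨x, hx, ?_⟩; omega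

-- ===== VERDICT (by name: the statement is the Claim_ definition above) =====
theorem threefold_spec : Claim_equal_threefold := by
  intro l _
  unfold Spec_threefold
  rw [threefold_eq_hasTriple, threefold_alt_eq_hasTriple]
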